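-- pv_equiv track=rewrite | github.com/numirias/semshi | rplugin/python3/semshi/parser.py | _minor_change
-- ===== SOURCE A (Python) =====
-- def _minor_change(old_lines, new_lines):
--     """Determine whether a minor change between old and new lines occurred.
--     Return (`minor_change`, `change_lineno`) where `minor_change` is True
--     when at most one change occurred and `change_lineno` is the line number
--     of the change.
--
--     A minor change is a change in a single line while the total number of
--     lines doesn't change.
--     """
--     if len(old_lines) != len(new_lines):
--         # A different number of lines doesn't count as minor change
--         return (False, None)
--     old_iter = iter(old_lines)
--     new_iter = iter(new_lines)
--     diff_lineno = None
--     lineno = 0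
--     try:
--         while True:
--             old_lines = next(old_iter)
--             new_lines = next(new_iter)
--             if old_lines != new_lines:
--                 if diff_lineno is not None:
--                     # More than one change must have happened
--                     return (False, None)
--                 diff_lineno = lineno
--             lineno += 1
--     except StopIteration:
--         # We iterated through all lines with at most one change
--         return (True, diff_lineno)
-- ===== SOURCE B (Python) =====
-- def _common_prefix_len(xs, ys):
--     k = 0
--     for x, y in zip(xs, ys):
--         if x != y:
--             break
--         k += 1
--     return k
--
--
-- def _minor_change(old_lines, new_lines):
--     """Prefix/suffix trim: strip the common prefix and common suffix;
--     the change is minor iff the remaining middle is empty or one line."""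
--     n = len(old_lines)
--     if n != len(new_lines):
--         return (False, None)
--     p = _common_prefix_len(old_lines, new_lines)
--     if p == n:
--         return (True, None)
--     s = _common_prefix_len(old_lines[::-1], new_lines[::-1])
--     if p + s == n - 1:
--         return (True, p)
--     return (False, None)
-- ===== Notes on version B (the rewrite author's own statement) =====
-- stated objective: alternative
-- what changed: Replaces A's single interleaved scan with mutable diff-state and early returns by the two-ended diff trick: compute the common-prefix length and the common-suffix length (prefix of the reversed lists), then judge minor iff the untrimmed middle is empty or one line, whose index is the prefix length.
import Mathlib
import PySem

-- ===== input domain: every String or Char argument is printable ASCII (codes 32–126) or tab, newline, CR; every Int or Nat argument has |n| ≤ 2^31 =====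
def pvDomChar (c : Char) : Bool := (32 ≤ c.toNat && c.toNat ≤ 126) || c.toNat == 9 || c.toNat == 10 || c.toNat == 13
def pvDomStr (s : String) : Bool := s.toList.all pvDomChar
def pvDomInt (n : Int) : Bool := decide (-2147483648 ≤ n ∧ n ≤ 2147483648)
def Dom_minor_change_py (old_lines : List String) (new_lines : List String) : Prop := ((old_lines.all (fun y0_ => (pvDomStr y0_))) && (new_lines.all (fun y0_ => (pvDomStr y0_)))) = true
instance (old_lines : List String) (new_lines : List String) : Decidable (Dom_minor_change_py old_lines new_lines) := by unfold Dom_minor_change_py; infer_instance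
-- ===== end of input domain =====

-- B replaces A's interleaved single scan by prefix/suffix trimming (minor iff at most one line remains untrimmed); same O(n) cost, a different algorithm.


-- ===== PORT A =====
-- Port of A: the while/next loop with mutable diff_lineno, transcribed as structural recursion;
-- exhausting either iterator (StopIteration) ends the loop with (true, diff).
def pvLoopA : List String → List String → Option Int → Int → Bool × Option Int
  | o :: os, n :: ns, diff, lineno =>
      if o ≠ n then
        match diff with
        | some _ => (false, none)
        | none => pvLoopA os ns (some lineno) (lineno + 1)
      else pvLoopA os ns diff (lineno + 1)
  | _, _, diff, _ => (true, diff)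

def minor_change_py (old_lines : List String) (new_lines : List String) : Bool × Option Int :=
  if old_lines.length ≠ new_lines.length then (false, none)
  else pvLoopA old_lines new_lines none 0

-- ===== PORT B =====
-- Port of B: _common_prefix_len's for-loop over zip as structural recursion (breaks at first mismatch).
def pvPrefLen : List String → List String → Nat
  | x :: xs, y :: ys => if x = y then pvPrefLen xs ys + 1 else 0
  | _, _ => 0

def minor_change_py_alt (old_lines : List String) (new_lines : List String) : Bool × Option Int :=
  let n := old_lines.length
  if n ≠ new_lines.length then (false, none)
  else
    let p := pvPrefLen old_lines new_lines
    if p = n then (true, none)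
    else
      let s := pvPrefLen old_lines.reverse new_lines.reverse
      if p + s = n - 1 then (true, some (p : Int)) else (false, none)

-- ===== PRECONDITION & SPEC =====
def Spec_minor_change_py (old_lines : List String) (new_lines : List String) (out : Bool × Option Int) : Prop := out = minor_change_py_alt old_lines new_lines
instance (old_lines : List String) (new_lines : List String) (out : Bool × Option Int) : Decidable (Spec_minor_change_py old_lines new_lines out) := by unfold Spec_minor_change_py; infer_instance

-- ===== CLAIM =====
def Claim_equal_minor_change_py : Prop := ∀ (old_lines : List String) (new_lines : List String), Dom_minor_change_py old_lines new_lines → Spec_minor_change_py old_lines new_lines (minor_change_py old_lines new_lines)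

-- ===== LEMMAS AND PROOFS =====
lemma pvPrefLen_le (a : List String) : ∀ b, pvPrefLen a b ≤ a.length := by
  induction a with
  | nil => intro b; simp [pvPrefLen]
  | cons x xs ih =>
    intro b
    cases b with
    | nil => simp [pvPrefLen]
    | cons y ys =>
      by_cases h : x = y
      · simp [pvPrefLen, h]; exact ih ys
      · simp [pvPrefLen, h]

lemma pvPrefLen_eq_len_iff (a : List String) : ∀ b, a.length = b.length →
    (pvPrefLen a b = a.length ↔ a = b) := by
  induction a with
  | nil => intro b hb; cases b <;> simp_all [pvPrefLen]
  | cons x xs ih =>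
    intro b hb
    cases b with
    | nil => simp at hb
    | cons y ys =>
      by_cases h : x = y
      · simp [pvPrefLen, h, ih ys (by simpa using hb)]
      · have := pvPrefLen_le xs ys
        simp [pvPrefLen, h]

lemma pvPrefLen_append (a : List String) : ∀ (b : List String) (u v : String),
    a.length = b.length →
    pvPrefLen (a ++ [u]) (b ++ [v]) =
      (if pvPrefLen a b = a.length then a.length + (if u = v then 1 else 0)
       else pvPrefLen a b) := by
  induction a with
  | nil =>
    intro b u v hb
    cases b with
    | nil => by_cases h : u = v <;> simp [pvPrefLen, h]
    | cons y ys => simp at hb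
  | cons x xs ih =>
    intro b u v hb
    cases b with
    | nil => simp at hb
    | cons y ys =>
      by_cases h : x = y
      · have hlen : xs.length = ys.length := by simpa using hb
        have hle := pvPrefLen_le xs ys
        by_cases he : pvPrefLen xs ys = xs.length <;>
          simp [pvPrefLen, h, ih ys u v hlen, he] <;> omega
      · simp [pvPrefLen, h]

lemma pvLoopA_some (xs : List String) : ∀ (ys : List String) (j i : Int),
    xs.length = ys.length →
    pvLoopA xs ys (some j) i = (if xs = ys then (true, some j) else (false, none)) := by
  induction xs with
  | nil => intro ys j i h; cases ys <;> simp_all [pvLoopA]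
  | cons o os ih =>
    intro ys j i h
    cases ys with
    | nil => simp at h
    | cons n ns =>
      by_cases hon : o = n
      · simp [pvLoopA, hon, ih ns j (i+1) (by simpa using h)]
      · simp [pvLoopA, hon]

lemma pvLoopA_char (xs : List String) : ∀ (ys : List String) (i : Int),
    xs.length = ys.length →
    pvLoopA xs ys none i =
      (if pvPrefLen xs ys = xs.length then (true, none)
       else if pvPrefLen xs ys + pvPrefLen xs.reverse ys.reverse = xs.length - 1
         then (true, some (i + (pvPrefLen xs ys : Int)))
         else (false, none)) := by
  induction xs with
  | nil => intro ys i h; cases ys <;> simp_all [pvLoopA, pvPrefLen]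
  | cons x xs ih =>
    intro ys i h
    cases ys with
    | nil => simp at h
    | cons y ys =>
      have hlen : xs.length = ys.length := by simpa using h
      by_cases hxy : x = y
      · -- equal heads: step into the tail with lineno i+1
        subst hxy
        rw [show pvLoopA (x :: xs) (x :: ys) none i = pvLoopA xs ys none (i+1) by
              simp [pvLoopA]]
        rw [ih ys (i+1) hlen]
        by_cases hp : pvPrefLen xs ys = xs.length
        · simp [pvPrefLen, hp]
        · -- tails differ, so suffix scan stops inside the tail region
          have hne : xs ≠ ys := fun hc => hp ((pvPrefLen_eq_len_iff xs ys hlen).mpr hc)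
          have hrevne : xs.reverse ≠ ys.reverse := by simpa using hne
          have hrevlen : xs.reverse.length = ys.reverse.length := by simpa using hlen
          have hrevlt : pvPrefLen xs.reverse ys.reverse < xs.length := by
            have hle := pvPrefLen_le xs.reverse ys.reverse
            have : pvPrefLen xs.reverse ys.reverse ≠ xs.reverse.length := fun hc =>
              hrevne ((pvPrefLen_eq_len_iff xs.reverse ys.reverse hrevlen).mp hc)
            simp only [List.length_reverse] at hle this
            omega
          have happ : pvPrefLen (xs.reverse ++ [x]) (ys.reverse ++ [x]) =
              pvPrefLen xs.reverse ys.reverse := by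
            rw [pvPrefLen_append xs.reverse ys.reverse x x hrevlen,
              if_neg (by simp only [List.length_reverse]; omega)]
          have hp1 : pvPrefLen (x :: xs) (x :: ys) = pvPrefLen xs ys + 1 := by
            simp [pvPrefLen]
          have hle := pvPrefLen_le xs ys
          simp only [hp1, List.reverse_cons, happ, List.length_cons]
          rw [if_neg hp, if_neg (show ¬(pvPrefLen xs ys + 1 = xs.length + 1) from by omega)]
          by_cases hc : pvPrefLen xs ys + pvPrefLen xs.reverse ys.reverse = xs.length - 1
          · rw [if_pos hc, if_pos (show pvPrefLen xs ys + 1 + pvPrefLen xs.reverse ys.reverse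
                = xs.length + 1 - 1 from by omega)]
            simp only [Prod.mk.injEq, Option.some.injEq, Nat.cast_add, Nat.cast_one, true_and]
            ring
          · rw [if_neg hc, if_neg (show ¬(pvPrefLen xs ys + 1 + pvPrefLen xs.reverse ys.reverse
                = xs.length + 1 - 1) from by omega)]
      · --mismatch at head
        rw [show pvLoopA (x :: xs) (y :: ys) none i = pvLoopA xs ys (some i) (i+1) by
              simp [pvLoopA, hxy]]
        rw [pvLoopA_some xs ys i (i+1) hlen]
        have hp0 : pvPrefLen (x :: xs) (y :: ys) = 0 := by simp [pvPrefLen, hxy]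
        have h1 : ¬ (pvPrefLen (x :: xs) (y :: ys) = (x :: xs).length) := by
          simp [hp0]
        by_cases hc : xs = ys
        · subst hc
          have happ : pvPrefLen (xs.reverse ++ [x]) (xs.reverse ++ [y]) = xs.length := by
            rw [pvPrefLen_append xs.reverse xs.reverse x y rfl]
            have : pvPrefLen xs.reverse xs.reverse = xs.reverse.length :=
              (pvPrefLen_eq_len_iff xs.reverse xs.reverse rfl).mpr rfl
            simp [this, hxy]
          have hcond : pvPrefLen (x :: xs) (y :: xs) +
              pvPrefLen (x :: xs).reverse (y :: xs).reverse = (x :: xs).length - 1 := by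
            simp only [hp0, List.reverse_cons, happ, List.length_cons]
            omega
          rw [if_neg h1, if_pos hcond]
          simp [hp0]
        · have hrevne : xs.reverse ≠ ys.reverse := by simpa using hc
          have hrevlen : xs.reverse.length = ys.reverse.length := by simpa using hlen
          have hrevlt : pvPrefLen xs.reverse ys.reverse < xs.length := by
            have hle := pvPrefLen_le xs.reverse ys.reverse
            have : pvPrefLen xs.reverse ys.reverse ≠ xs.reverse.length := fun hcc =>
              hrevne ((pvPrefLen_eq_len_iff xs.reverse ys.reverse hrevlen).mp hcc)
            simp only [List.length_reverse] at hle this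
            omega
          have happ : pvPrefLen (xs.reverse ++ [x]) (ys.reverse ++ [y]) =
              pvPrefLen xs.reverse ys.reverse := by
            rw [pvPrefLen_append xs.reverse ys.reverse x y hrevlen,
              if_neg (by simp only [List.length_reverse]; omega)]
          have h2 : ¬ (pvPrefLen (x :: xs) (y :: ys) +
              pvPrefLen (x :: xs).reverse (y :: ys).reverse = (x :: xs).length - 1) := by
            simp only [hp0, List.reverse_cons, happ, List.length_cons]
            omega
          rw [if_neg h1, if_neg h2, if_neg hc]

-- ===== VERDICT =====
theorem minor_change_py_spec : Claim_equal_minor_change_py := by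
  intro old_lines new_lines _
  unfold Spec_minor_change_py minor_change_py minor_change_py_alt
  by_cases h : old_lines.length = new_lines.length
  · simp only [← h, ne_eq, not_true_eq_false, if_false]
    rw [pvLoopA_char old_lines new_lines 0 h]
    split_ifs <;> simp
  · simp [h]
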